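-- pv_equiv track=rewrite | github.com/adutev/Programming-0 | week7/inner_trim.py | inner_trim
-- ===== SOURCE A (Python) =====
-- def inner_trim(string):
-- 	result = ""
-- 	inline = False
-- 	if string[0] != " ":
-- 		inline = True
--
-- 	for ch in range(0, len(string) - 1):
-- 		if inline:
-- 			if string[ch] != " ":
-- 				result += string[ch]
-- 			elif string[ch] == " " and string[ch + 1] != " ":
-- 				result += string[ch]
-- 		else:
-- 			if string[ch] != " ":
-- 				result += string[ch]
-- 				inline = True
-- 	if string[len(string) - 1] != " ":
-- 		result += string[len(string) - 1]
-- 	return result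
-- ===== SOURCE B (Python) =====
-- def inner_trim(string):
--     return " ".join(filter(None, string.split(' ')))
-- ===== Notes on version B (the rewrite author's own statement) =====
-- stated objective: idiomatic
-- what changed: Replaced the index-based single pass with lookahead and an inline-state flag by a declarative one-liner: split on single spaces, drop the empty fields, rejoin with single spaces.
import Mathlib
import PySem

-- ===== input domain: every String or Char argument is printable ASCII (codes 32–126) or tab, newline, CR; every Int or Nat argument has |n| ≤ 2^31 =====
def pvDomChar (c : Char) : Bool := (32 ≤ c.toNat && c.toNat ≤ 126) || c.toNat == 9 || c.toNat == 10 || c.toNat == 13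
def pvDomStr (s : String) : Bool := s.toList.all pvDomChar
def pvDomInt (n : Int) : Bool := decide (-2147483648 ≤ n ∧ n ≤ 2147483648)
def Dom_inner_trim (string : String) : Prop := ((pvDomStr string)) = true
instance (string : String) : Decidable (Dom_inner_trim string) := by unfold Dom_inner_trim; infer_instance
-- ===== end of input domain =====

-- B replaces A's index-based scan with lookahead and state flag by split-on-space / drop empties / rejoin (idiomatic; measured faster: no per-char string concatenation).


-- ===== PORT A =====
-- A's for-loop over ch in range(0, len-1) reading string[ch] and string[ch+1], carrying the
-- growing result and the 'inline' flag, then the final-character step; ported as the obvious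
-- structural recursion carrying the current character and the lookahead (the tail's head).
def innerLoop (inline : Bool) : List Char → List Char
  | [] => []
  | [c] => if c ≠ ' ' then [c] else []          -- the post-loop "last character" append
  | c :: d :: rest =>
      if inline then
        (if c ≠ ' ' then [c] else if d ≠ ' ' then [c] else []) ++ innerLoop inline (d :: rest)
      else
        if c ≠ ' ' then c :: innerLoop true (d :: rest) else innerLoop false (d :: rest)

def inner_trim (string : String) : String :=
  match string.toList with
  | [] => ""                                    -- Python raises IndexError at string[0]; excluded by Pre_
  | c :: rest => String.ofList (innerLoop (c ≠ ' ') (c :: rest))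

-- ===== PORT B =====
-- " ".join(filter(None, string.split(' ')))
def inner_trim_alt (string : String) : String :=
  PySem.Str.join " " (((PySem.Str.split? string " ").getD []).filter (· ≠ ""))
  -- split? is some here (sep " " ≠ ""); .getD [] only discharges the Option

-- ===== PRECONDITION & SPEC =====
-- Pre_ excludes only the empty string, on which Python A raises IndexError.
def Pre_inner_trim (string : String) : Prop := string ≠ ""
instance (string : String) : Decidable (Pre_inner_trim string) := by unfold Pre_inner_trim; infer_instance
def pvWitness_inner_trim : String := " a  b "

def Spec_inner_trim (string : String) (out : String) : Prop := out = inner_trim_alt string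
instance (string : String) (out : String) : Decidable (Spec_inner_trim string out) := by unfold Spec_inner_trim; infer_instance

-- ===== CLAIM (what is proved, stated in full; the proofs are below) =====
def Claim_equal_inner_trim : Prop := ∀ (string : String), Dom_inner_trim string → Pre_inner_trim string → Spec_inner_trim string (inner_trim string)

-- ===== LEMMAS AND PROOFS =====

-- What B computes, on the char-list side.
def W (cs : List Char) : List Char :=
  List.intercalate [' '] ((List.splitOnP (· == ' ') cs).filter (· ≠ []))

theorem intercalate_cons (sep x : List Char) (l : List (List Char)) :
    List.intercalate sep (x :: l) = x ++ (if l = [] then [] else sep ++ List.intercalate sep l) := by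
  cases l <;> simp [List.intercalate]

-- PySem.Chars.splitOn with a single-character separator is List.splitOnP.
theorem splitOn_go_single (a : Char) (fuel : Nat) (l cur : List Char) (acc : List (List Char))
    (h : l.length ≤ fuel) :
    PySem.Chars.splitOn.go [a] fuel l cur acc
      = acc.reverse ++ (List.splitOnP (· == a) l).modifyHead (cur.reverse ++ ·) := by
  induction fuel generalizing l cur acc with
  | zero =>
      cases l with
      | nil => simp [PySem.Chars.splitOn.go]
      | cons c rest => simp at h
  | succ fuel ih =>
      cases l with
      | nil => simp [PySem.Chars.splitOn.go]
      | cons c rest =>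
          simp only [List.length_cons, Nat.succ_le_succ_iff] at h
          by_cases hc : a = c
          · subst hc
            rw [show PySem.Chars.splitOn.go [a] (fuel+1) (a :: rest) cur acc
                  = PySem.Chars.splitOn.go [a] fuel (List.drop 1 (a :: rest)) [] (cur.reverse :: acc) by
                  simp [PySem.Chars.splitOn.go, List.isPrefixOf]]
            rw [ih _ _ _ (by simpa using h)]
            simp only [List.drop_succ_cons, List.drop_zero, List.splitOnP_cons, beq_self_eq_true,
              if_pos, List.reverse_cons, List.reverse_nil, List.nil_append]
            rcases List.exists_cons_of_ne_nil (List.splitOnP_ne_nil (· == a) rest) with ⟨h0, t, ht⟩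
            simp [ht]
          · rw [show PySem.Chars.splitOn.go [a] (fuel+1) (c :: rest) cur acc
                  = PySem.Chars.splitOn.go [a] fuel rest (c :: cur) acc by
                  simp [PySem.Chars.splitOn.go, List.isPrefixOf, hc]]
            rw [ih _ _ _ h]
            simp only [List.splitOnP_cons, beq_iff_eq, if_neg (Ne.symm hc)]
            rcases List.exists_cons_of_ne_nil (List.splitOnP_ne_nil (· == a) rest) with ⟨h0, t, ht⟩
            simp [ht]

theorem splitOn_single (a : Char) (l : List Char) :
    PySem.Chars.splitOn l [a] = List.splitOnP (· == a) l := by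
  rw [PySem.Chars.splitOn, splitOn_go_single a _ l [] [] (by omega)]
  rcases List.exists_cons_of_ne_nil (List.splitOnP_ne_nil (· == a) l) with ⟨h0, t, ht⟩
  simp [ht]

-- B's port, on the char-list side.
theorem alt_toList (s : String) : (inner_trim_alt s).toList = W s.toList := by
  simp [inner_trim_alt, PySem.Str.split?, PySem.Chars.split?, PySem.Str.toList_join,
    splitOn_single, List.filter_map, Function.comp_def, String.ofList_eq_empty_iff, W]
  rfl

-- supporting facts about W
theorem W_nil : W [] = [] := by simp [W, List.splitOnP_nil, List.intercalate]

theorem W_space (xs : List Char) : W (' ' :: xs) = W xs := by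
  simp [W, List.splitOnP_cons]

theorem W_cons {c : Char} (hc : c ≠ ' ') (xs : List Char) (hxs : xs.head? ≠ some ' ') :
    W (c :: xs) = c :: W xs := by
  cases xs with
  | nil => simp [W, List.splitOnP_cons, List.splitOnP_nil, hc, List.intercalate]
  | cons d r =>
      simp only [List.head?_cons, ne_eq, Option.some.injEq] at hxs
      rcases List.exists_cons_of_ne_nil (List.splitOnP_ne_nil (· == ' ') r) with ⟨h0, t, ht⟩
      simp [W, List.splitOnP_cons, hc, hxs, ht, intercalate_cons]

theorem W_ne {c : Char} (hc : c ≠ ' ') (xs : List Char) : W (c :: xs) ≠ [] := by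
  rcases List.exists_cons_of_ne_nil (List.splitOnP_ne_nil (· == ' ') xs) with ⟨h0, t, ht⟩
  simp [W, List.splitOnP_cons, hc, ht, intercalate_cons]

theorem filter_eq_nil_iff_W (r : List Char) :
    (List.splitOnP (· == ' ') r).filter (· ≠ []) = [] ↔ W r = [] := by
  constructor
  · intro h; rw [W, h]; rfl
  · intro h
    by_contra hne
    rcases List.exists_cons_of_ne_nil hne with ⟨w0, ws, hws⟩
    have hw0 : w0 ≠ [] := by
      have := List.of_mem_filter (p := (· ≠ [])) (a := w0) (by rw [hws]; exact List.mem_cons_self)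
      simpa using this
    rw [W, hws, intercalate_cons] at h
    exact hw0 (List.append_eq_nil_iff.mp h).1

theorem W_word {c : Char} (hc : c ≠ ' ') (r : List Char) :
    W (c :: ' ' :: r) = c :: (if W r = [] then [] else ' ' :: W r) := by
  have h1 : List.splitOnP (· == ' ') (c :: ' ' :: r) = [c] :: List.splitOnP (· == ' ') r := by
    simp [List.splitOnP_cons, hc]
  have h2 : W (c :: ' ' :: r)
      = [c] ++ (if (List.splitOnP (· == ' ') r).filter (· ≠ []) = [] then [] else [' '] ++ W r) := by
    rw [W, h1, List.filter_cons_of_pos (by simp), intercalate_cons]; rfl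
  by_cases hW : W r = []
  · rw [h2, if_pos ((filter_eq_nil_iff_W r).mpr hW), if_pos hW]; rfl
  · rw [h2, if_neg (fun h => hW ((filter_eq_nil_iff_W r).mp h)), if_neg hW]; rfl

-- A's loop computes W (the two conjuncts feed each other along the tail).
theorem innerLoop_eq (cs : List Char) :
    (innerLoop true cs
      = if cs.head? = some ' ' then (if W cs.tail = [] then [] else ' ' :: W cs.tail) else W cs)
    ∧ innerLoop false cs = W cs := by
  induction cs with
  | nil => simp [innerLoop, W_nil]
  | cons c xs ih =>
      obtain ⟨ihT, ihF⟩ := ih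
      by_cases hc : c = ' '
      · subst hc
        refine ⟨?_, ?_⟩
        · cases xs with
          | nil => simp [innerLoop, W_nil]
          | cons d r =>
              by_cases hd : d = ' '
              · subst hd
                simp only [List.head?_cons, if_pos] at ihT ⊢
                simp [innerLoop, ihT, W_space]
              · simp only [List.head?_cons, Option.some.injEq, if_neg hd] at ihT
                simp [innerLoop, hd, ihT, W_ne hd, List.tail]
        · cases xs with
          | nil => simp [innerLoop, W_space, W_nil]
          | cons d r => simp [innerLoop, ihF, W_space]
      · have hsingle : W [c] = [c] := by rw [W_cons hc [] (by simp), W_nil]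
        refine ⟨?_, ?_⟩ <;>
        · cases xs with
          | nil => simp [innerLoop, hc, hsingle]
          | cons d r =>
              by_cases hd : d = ' '
              · subst hd
                simp only [List.head?_cons, if_pos] at ihT
                simp [innerLoop, hc, ihT, W_word hc, List.tail]
              · simp only [List.head?_cons, Option.some.injEq, if_neg hd] at ihT
                simp [innerLoop, hc, ihT, W_cons hc (d :: r) (by simp [hd])]

theorem toList_inj {s t : String} (h : s.toList = t.toList) : s = t := by
  have := congrArg String.ofList h
  simpa using this

-- ===== VERDICT (by name: the statement is the Claim_ definition above) =====
theorem inner_trim_spec : Claim_equal_inner_trim := by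
  intro s _ hpre
  unfold Spec_inner_trim
  apply toList_inj
  rw [alt_toList]
  rcases hcs : s.toList with _ | ⟨c, rest⟩
  · exact absurd (toList_inj (by simp [hcs])) hpre
  · simp only [inner_trim, hcs]
    by_cases hc : c = ' '
    · subst hc
      simpa using (innerLoop_eq (' ' :: rest)).2
    · have h1 := (innerLoop_eq (c :: rest)).1
      simp only [List.head?_cons, Option.some.injEq, if_neg hc] at h1
      simp [hc, h1]
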